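-- pv_equiv track=rewrite | github.com/cmbritton/aoc-2024 | src/main/python/day04.py | diagonals_bottom_to_top
-- ===== SOURCE A (Python) =====
-- def diagonals_bottom_to_top(matrix: list[str]) -> list[str]:
--     n = len(matrix)
--     new_rows = []
--
--     for col in range(len(matrix)):
--         new_row = []
--         for row in range(n - 1, -1, -1):
--             new_row.append(matrix[row][col])
--         new_rows.append(''.join(new_row))
--
--     return new_rows
-- ===== SOURCE B (Python) =====
-- def diagonals_bottom_to_top(matrix: list[str]) -> list[str]:
--     n = len(matrix)
--     buffers = [[] for _ in range(n)]
--     for row in reversed(matrix):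
--         for col in range(n):
--             buffers[col].append(row[col])
--     return [''.join(buf) for buf in buffers]
-- ===== Notes on version B (the rewrite author's own statement) =====
-- stated objective: alternative
-- what changed: B reverses the loop nesting: one pass over the rows bottom-to-top maintaining n simultaneous column buffers, instead of A's per-column inner downward scan.
import Mathlib
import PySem

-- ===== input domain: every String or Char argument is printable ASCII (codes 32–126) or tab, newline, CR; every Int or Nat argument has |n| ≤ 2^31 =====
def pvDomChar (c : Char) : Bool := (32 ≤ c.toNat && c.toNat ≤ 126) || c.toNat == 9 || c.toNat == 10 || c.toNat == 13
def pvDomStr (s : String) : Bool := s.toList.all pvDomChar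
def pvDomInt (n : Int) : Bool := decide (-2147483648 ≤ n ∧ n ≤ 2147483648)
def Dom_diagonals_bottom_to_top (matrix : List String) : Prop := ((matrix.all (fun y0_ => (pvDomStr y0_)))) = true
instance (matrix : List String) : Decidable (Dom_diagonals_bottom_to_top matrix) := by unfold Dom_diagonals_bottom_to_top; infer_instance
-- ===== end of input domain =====

-- B reverses the loop nesting (one pass over the rows bottom-to-top, n simultaneous column
-- buffers) instead of A's per-column inner downward scan; objective: alternative decomposition, same cost.

-- ===== PORT A =====
-- A: for col in range(n): build a column by scanning rows from n-1 down to 0, then join.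
-- matrix[row][col] is ported with pyGetD (row index always in range; col in range by Pre_).
def diagonals_bottom_to_top (matrix : List String) : List String :=
  let n : Int := matrix.length
  (PySem.List.pyRange 0 n 1).foldl
    (fun newRows col =>
      let newRow : List Char :=
        (PySem.List.pyRange (n - 1) (-1) (-1)).foldl
          (fun acc row =>
            acc ++ [PySem.List.pyGetD (PySem.List.pyGetD matrix row "").toList col ' '])
          []
      newRows ++ [String.ofList newRow])
    []

-- ===== PORT B =====
-- B: n empty buffers; one pass over the reversed rows appending row[col] to buffer col; join at the end.
def diagonals_bottom_to_top_alt (matrix : List String) : List String :=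
  let n := matrix.length
  let buffers : List (List Char) :=
    matrix.reverse.foldl
      (fun bufs row =>
        bufs.mapIdx (fun col buf => buf ++ [PySem.List.pyGetD row.toList (col : Int) ' ']))
      (List.replicate n [])
  buffers.map (fun buf => String.ofList buf)

-- ===== PRECONDITION & SPEC =====
-- Pre_: every row has at least n = len(matrix) characters — exactly where A's matrix[row][col]
-- access (col < n) does not raise IndexError.
def Pre_diagonals_bottom_to_top (matrix : List String) : Prop :=
  ∀ s ∈ matrix, matrix.length ≤ s.toList.length
instance (matrix : List String) : Decidable (Pre_diagonals_bottom_to_top matrix) := by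
  unfold Pre_diagonals_bottom_to_top; infer_instance
def pvWitness_diagonals_bottom_to_top : List String := ["ab", "cd"]
def Spec_diagonals_bottom_to_top (matrix : List String) (out : List String) : Prop := out = diagonals_bottom_to_top_alt matrix
instance (matrix : List String) (out : List String) : Decidable (Spec_diagonals_bottom_to_top matrix out) := by unfold Spec_diagonals_bottom_to_top; infer_instance

-- ===== CLAIM (what is proved, stated in full; the proofs are below) =====
def Claim_equal_diagonals_bottom_to_top : Prop := ∀ (matrix : List String), Dom_diagonals_bottom_to_top matrix → Pre_diagonals_bottom_to_top matrix → Spec_diagonals_bottom_to_top matrix (diagonals_bottom_to_top matrix)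

-- ===== LEMMAS AND PROOFS =====

-- A's outer loop appends one joined column per col: it is a map over the column range.
theorem A_closed (matrix : List String) :
    diagonals_bottom_to_top matrix =
      (PySem.List.pyRange 0 (matrix.length : Int) 1).map (fun col =>
        String.ofList ((matrix.map (fun s => PySem.List.pyGetD s.toList col ' ')).reverse)) := by
  unfold diagonals_bottom_to_top
  rw [PySem.List.foldl_append_singleton_eq_map]
  refine List.map_congr_left (fun col _ => ?_)
  rw [PySem.List.foldl_append_singleton_eq_map]
  have h : PySem.List.pyRange ((matrix.length : Int) - 1) (-1) (-1)
      = (PySem.List.pyRange 0 (matrix.length : Int) 1).reverse := by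
    rw [PySem.List.pyRange_neg_one_eq_reverse]; norm_num
  rw [h, List.map_reverse]
  have h2 : (PySem.List.pyRange 0 (matrix.length : Int) 1).map
        (fun row => PySem.List.pyGetD (PySem.List.pyGetD matrix row "").toList col ' ')
      = ((PySem.List.pyRange 0 (matrix.length : Int) 1).map
          (fun row => PySem.List.pyGetD matrix row "")).map
          (fun s => PySem.List.pyGetD s.toList col ' ') := by
    rw [List.map_map]
    rfl
  rw [h2, PySem.List.map_pyGetD_pyRange_zero']
  simp

-- B's single pass over the reversed rows extends every buffer by that row's character:
-- folding appends, per buffer, the whole column read off the traversed rows.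
theorem B_fold (rs : List String) (bufs : List (List Char)) :
    rs.foldl
      (fun bufs row => bufs.mapIdx (fun col buf => buf ++ [PySem.List.pyGetD row.toList (col : Int) ' ']))
      bufs
    = bufs.mapIdx (fun col buf => buf ++ rs.map (fun row => PySem.List.pyGetD row.toList (col : Int) ' ')) := by
  induction rs generalizing bufs with
  | nil => simp [List.mapIdx_eq_zipIdx_map]
  | cons r rs ih =>
    simp only [List.foldl_cons, ih, List.mapIdx_mapIdx, List.map_cons]
    apply List.ext_getElem <;> simp

theorem B_closed (matrix : List String) :
    diagonals_bottom_to_top_alt matrix =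
      (PySem.List.pyRange 0 (matrix.length : Int) 1).map (fun col =>
        String.ofList ((matrix.map (fun s => PySem.List.pyGetD s.toList col ' ')).reverse)) := by
  unfold diagonals_bottom_to_top_alt
  simp only [B_fold, PySem.List.pyRange_zero_nat]
  apply List.ext_getElem <;> simp [← List.map_reverse]

-- ===== VERDICT (by name: the statement is the Claim_ definition above) =====
theorem diagonals_bottom_to_top_spec : Claim_equal_diagonals_bottom_to_top := by
  intro matrix _ _
  unfold Spec_diagonals_bottom_to_top
  rw [A_closed, B_closed]
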